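-- pv_equiv track=rewrite | github.com/kosayoda/Advent-of-Code-2018 | Day 7/part_2.py | work_done
-- ===== SOURCE A (Python) =====
-- def work_done(frontier, traversed, edges, work):
--     '''
--     Updates the frontier and traversed if a job is done
--     '''
--
--     traversed.append(work)
--
--     available_nodes = [
--         node_2 for node_1, node_2 in edges if node_1 == work
--     ]  # Nodes that have the current node as a prerequisite
--
--     for node in available_nodes:
--         '''
--         Node is blocked if the node has a prerequisite which is not the current
--         node and the prerequisite has not been traversed
--         '''
--         node_blocked = any(
--             node_1 for node_1, node_2 in edges if (node_2 == node) and
--             (node_1 != work) and (node_1 not in traversed)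
--         )
--         if not node_blocked:
--             frontier.add(node)
--
--     return frontier, traversed
-- ===== SOURCE B (Python) =====
-- def work_done(frontier, traversed, edges, work):
--     '''
--     Updates the frontier and traversed if a job is done
--     '''
--     traversed.append(work)
--     done = set(traversed)
--     succs = []       # successors of the finished job, in edge order
--     blocked = set()  # nodes having an untraversed prerequisite other than work
--     for pre, node in edges:
--         if pre == work:
--             succs.append(node)
--         elif pre not in done:
--             blocked.add(node)
--     for node in succs:
--         if node not in blocked:
--             frontier.add(node)
--     return frontier, traversed
-- ===== Notes on version B (the rewrite author's own statement) =====
-- stated objective: alternative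
-- what changed: A rescans the whole edge list once per successor of the finished job to decide blockedness; B makes a single pass over edges that simultaneously collects the successors and a blocked-set (nodes with an untraversed non-work prerequisite), then adds each unblocked successor, and B also fixes A's truthiness slip in the blocked test.
-- intended difference: On inputs where some successor n of work (not already in the frontier) has ("", n) as its only untraversed non-work prerequisite, A adds n to the frontier because any(node_1 ...) tests the prerequisite NAME's truthiness so an empty-string prerequisite never blocks, while B correctly leaves n blocked, which is the intended dependency semantics. — e.g. on work_done([], [], [("A", "B"), ("", "B")], "A"): A returns (["B"], ["A"]), B returns ([], ["A"])
import Mathlib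
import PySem

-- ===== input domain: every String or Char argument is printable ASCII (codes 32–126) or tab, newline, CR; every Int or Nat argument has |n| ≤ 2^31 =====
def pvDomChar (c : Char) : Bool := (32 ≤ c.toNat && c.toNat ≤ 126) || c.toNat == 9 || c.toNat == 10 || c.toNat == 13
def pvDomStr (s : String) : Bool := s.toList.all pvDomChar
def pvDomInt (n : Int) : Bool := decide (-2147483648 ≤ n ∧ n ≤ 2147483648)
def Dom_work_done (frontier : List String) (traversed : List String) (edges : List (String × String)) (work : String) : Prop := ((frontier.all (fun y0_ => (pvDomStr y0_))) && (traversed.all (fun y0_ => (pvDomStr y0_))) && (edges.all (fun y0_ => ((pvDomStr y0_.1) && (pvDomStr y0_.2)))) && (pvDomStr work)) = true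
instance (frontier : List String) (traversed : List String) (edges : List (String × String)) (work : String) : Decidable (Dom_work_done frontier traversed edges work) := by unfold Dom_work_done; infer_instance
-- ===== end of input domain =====

-- B replaces A's per-successor rescan of all edges by a single pass over edges that collects
-- successors and a blocked-set at once (objective: alternative). Both A and B mutate `frontier`
-- and `traversed` in place in Python the same way; the theorems are about the return value.

-- ===== PORT A =====
-- `any(node_1 for …)` is Python truthiness of the string node_1: true iff node_1 ≠ "".
def work_done (frontier : List String) (traversed : List String) (edges : List (String × String)) (work : String) : List String × List String :=
  let traversed' := traversed ++ [work]
  let available := (edges.filter (fun e => e.1 == work)).map (fun e => e.2)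
  let frontier' := available.foldl (fun fr node =>
    let blocked := edges.any (fun e =>
      ((e.2 == node) && (e.1 != work) && !(traversed'.contains e.1)) && (e.1 != ""))
    if !blocked then PySem.Set.add fr node else fr) frontier
  (frontier', traversed')

-- ===== PORT B =====
def work_done_alt (frontier : List String) (traversed : List String) (edges : List (String × String)) (work : String) : List String × List String :=
  let traversed' := traversed ++ [work]
  let done : PySem.Set String := PySem.Set.ofList traversed'
  let sb := edges.foldl (fun (p : List String × PySem.Set String) e =>
    if e.1 == work then (p.1 ++ [e.2], p.2)
    else if !(PySem.Set.contains done e.1) then (p.1, PySem.Set.add p.2 e.2)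
    else p) ([], PySem.Set.empty)
  let frontier' := sb.1.foldl (fun fr node =>
    if !(PySem.Set.contains sb.2 node) then PySem.Set.add fr node else fr) frontier
  (frontier', traversed')

-- ===== PRECONDITION & SPEC =====
-- A's `any(node_1 …)` tests the truthiness of the prerequisite's NAME, so a prerequisite named ""
-- never blocks: on inputs where some successor n of work (not already in frontier) has the edge
-- ("", n) as its only untraversed non-work prerequisite, A wrongly adds n to the frontier while
-- B correctly leaves it blocked, which is the intended behaviour.
def D_work_done (frontier : List String) (traversed : List String) (edges : List (String × String)) (work : String) : Prop :=
  ∃ e ∈ edges, e.1 = work ∧ e.2 ∉ frontier ∧ ("", e.2) ∈ edges ∧ work ≠ "" ∧ "" ∉ traversed ∧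
    ∀ e' ∈ edges, e'.2 = e.2 → e'.1 ≠ work → e'.1 ≠ "" → e'.1 ∈ traversed
instance (frontier : List String) (traversed : List String) (edges : List (String × String)) (work : String) : Decidable (D_work_done frontier traversed edges work) := by unfold D_work_done; infer_instance

def Spec_work_done (frontier : List String) (traversed : List String) (edges : List (String × String)) (work : String) (out : List String × List String) : Prop := ¬ D_work_done frontier traversed edges work → out = work_done_alt frontier traversed edges work
instance (frontier : List String) (traversed : List String) (edges : List (String × String)) (work : String) (out : List String × List String) : Decidable (Spec_work_done frontier traversed edges work out) := by unfold Spec_work_done; infer_instance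

def pvDiffWitness_work_done : List String × List String × (List (String × String)) × String := ([], [], [("A", "B"), ("", "B")], "A")
def pvDiffWitnessOut_work_done : (List String × List String) × (List String × List String) := ((["B"], ["A"]), ([], ["A"]))

-- ===== CLAIM (what is proved, stated in full; the proofs are below) =====
def Claim_unchanged_work_done : Prop := ∀ (frontier : List String) (traversed : List String) (edges : List (String × String)) (work : String), Dom_work_done frontier traversed edges work → Spec_work_done frontier traversed edges work (work_done frontier traversed edges work)
def Claim_changed_work_done : Prop := Dom_work_done (pvDiffWitness_work_done.1) (pvDiffWitness_work_done.2.1) (pvDiffWitness_work_done.2.2.1) (pvDiffWitness_work_done.2.2.2) ∧ D_work_done (pvDiffWitness_work_done.1) (pvDiffWitness_work_done.2.1) (pvDiffWitness_work_done.2.2.1) (pvDiffWitness_work_done.2.2.2) ∧ work_done (pvDiffWitness_work_done.1) (pvDiffWitness_work_done.2.1) (pvDiffWitness_work_done.2.2.1) (pvDiffWitness_work_done.2.2.2) = pvDiffWitnessOut_work_done.1 ∧ work_done_alt (pvDiffWitness_work_done.1) (pvDiffWitness_work_done.2.1) (pvDiffWitness_work_done.2.2.1) (pvDiffWitness_work_done.2.2.2)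 = pvDiffWitnessOut_work_done.2 ∧ pvDiffWitnessOut_work_done.1 ≠ pvDiffWitnessOut_work_done.2
def Claim_exact_work_done : Prop := ∀ (frontier : List String) (traversed : List String) (edges : List (String × String)) (work : String), Dom_work_done frontier traversed edges work → D_work_done frontier traversed edges work → work_done frontier traversed edges work ≠ work_done_alt frontier traversed edges work

-- ===== LEMMAS AND PROOFS =====

theorem pv_fold_fst (edges : List (String × String)) (work : String)
    (done : PySem.Set String) (acc : List String × PySem.Set String) :
    (edges.foldl (fun (p : List String × PySem.Set String) e =>
      if e.1 == work then (p.1 ++ [e.2], p.2)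
      else if !(PySem.Set.contains done e.1) then (p.1, PySem.Set.add p.2 e.2)
      else p) acc).1 = acc.1 ++ (edges.filter (fun e => e.1 == work)).map (fun e => e.2) := by
  induction edges generalizing acc with
  | nil => simp
  | cons e es ih =>
    rw [List.foldl_cons]
    by_cases h : (e.1 == work) = true
    · rw [if_pos h, ih]; simp [h]
    · rw [if_neg h]
      by_cases h2 : (!(PySem.Set.contains done e.1)) = true
      · rw [if_pos h2, ih]; simp [h]
      · rw [if_neg h2, ih]; simp [h]

theorem pv_fold_snd (edges : List (String × String)) (work : String)
    (done : PySem.Set String) (acc : List String × PySem.Set String) (x : String) :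
    (x ∈ (edges.foldl (fun (p : List String × PySem.Set String) e =>
      if e.1 == work then (p.1 ++ [e.2], p.2)
      else if !(PySem.Set.contains done e.1) then (p.1, PySem.Set.add p.2 e.2)
      else p) acc).2) ↔
    (x ∈ acc.2 ∨ ∃ e ∈ edges, e.1 ≠ work ∧ ¬ (PySem.Set.contains done e.1 = true) ∧ e.2 = x) := by
  induction edges generalizing acc with
  | nil => simp
  | cons e es ih =>
    rw [List.foldl_cons]
    by_cases h : (e.1 == work) = true
    · rw [if_pos h, ih]
      rw [beq_iff_eq] at h
      simp [h]
    · rw [if_neg h]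
      rw [beq_iff_eq] at h
      by_cases h2 : (!(PySem.Set.contains done e.1)) = true
      · rw [if_pos h2, ih]
        simp only [Bool.not_eq_true'] at h2
        have hm : e.1 ∉ done := by rw [← PySem.Set.contains_iff, h2]; simp
        simp [PySem.Set.mem_add, h]
        constructor
        · rintro ((hx | rfl) | ⟨a, ha, haw, had⟩)
          · exact Or.inl hx
          · exact Or.inr (Or.inl ⟨hm, rfl⟩)
          · exact Or.inr (Or.inr ⟨a, ha, haw, had⟩)
        · rintro (hx | ⟨_, rfl⟩ | ⟨a, ha, haw, had⟩)
          · exact Or.inl (Or.inl hx)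
          · exact Or.inl (Or.inr rfl)
          · exact Or.inr ⟨a, ha, haw, had⟩
      · rw [if_neg h2, ih]
        simp only [Bool.not_eq_true', Bool.not_eq_false] at h2
        have hm : e.1 ∈ done := by rw [← PySem.Set.contains_iff]; exact h2
        simp [h]
        constructor
        · rintro (hx | hrest)
          · exact Or.inl hx
          · exact Or.inr (Or.inr hrest)
        · rintro (hx | ⟨hnd, rfl⟩ | hrest)
          · exact Or.inl hx
          · exact absurd hm hnd
          · exact Or.inr hrest

-- A's blocked test at a node, as a Bool
def pvBlkA (edges : List (String × String)) (work : String) (traversed' : List String) (node : String) : Bool :=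
  edges.any (fun e =>
    ((e.2 == node) && (e.1 != work) && !(traversed'.contains e.1)) && (e.1 != ""))

-- B's blocked set contains node  ↔  some untraversed non-work prerequisite (possibly "") exists
theorem pv_blkB_iff (edges : List (String × String)) (work : String) (traversed' : List String) (node : String) :
    (PySem.Set.contains
      ((edges.foldl (fun (p : List String × PySem.Set String) e =>
        if e.1 == work then (p.1 ++ [e.2], p.2)
        else if !(PySem.Set.contains (PySem.Set.ofList traversed') e.1) then (p.1, PySem.Set.add p.2 e.2)
        else p) ([], PySem.Set.empty)).2) node = true) ↔
    ∃ e ∈ edges, e.1 ≠ work ∧ e.1 ∉ traversed' ∧ e.2 = node := by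
  rw [PySem.Set.contains_iff, pv_fold_snd]
  simp [PySem.Set.mem_ofList, PySem.Set.empty]

theorem pv_blkA_iff (edges : List (String × String)) (work : String) (traversed' : List String) (node : String) :
    (pvBlkA edges work traversed' node = true) ↔
    ∃ e ∈ edges, e.2 = node ∧ e.1 ≠ work ∧ e.1 ∉ traversed' ∧ e.1 ≠ "" := by
  unfold pvBlkA
  rw [List.any_eq_true]
  constructor
  · rintro ⟨e, he, hb⟩
    simp only [Bool.and_eq_true, beq_iff_eq, bne_iff_ne, Bool.not_eq_true',
      List.contains_eq_mem, decide_eq_false_iff_not] at hb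
    exact ⟨e, he, by tauto⟩
  · rintro ⟨e, he, h1, h2, h3, h4⟩
    refine ⟨e, he, ?_⟩
    simp only [Bool.and_eq_true, beq_iff_eq, bne_iff_ne, Bool.not_eq_true',
      List.contains_eq_mem, decide_eq_false_iff_not]
    tauto

-- the two per-node guards, named
def pvAddA (edges : List (String × String)) (work : String) (traversed' : List String) (node : String) : Bool :=
  !(pvBlkA edges work traversed' node)
def pvAddB (blk : PySem.Set String) (node : String) : Bool :=
  !(PySem.Set.contains blk node)

theorem pv_fold_congr (avail : List String) (gA gB : String → Bool) (fr : List String)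
    (h : ∀ n ∈ avail, gA n = gB n ∨ n ∈ fr) :
    avail.foldl (fun fr node => if gA node then PySem.Set.add fr node else fr) fr =
    avail.foldl (fun fr node => if gB node then PySem.Set.add fr node else fr) fr := by
  induction avail generalizing fr with
  | nil => rfl
  | cons n ns ih =>
    have hn := h n (List.mem_cons_self)
    rcases hn with heq | hmem
    · simp only [List.foldl_cons, heq]
      by_cases hg : gB n
      · simp only [hg, if_pos]
        exact ih _ (fun m hm => (h m (List.mem_cons_of_mem _ hm)).imp id
          (fun h' => by rw [PySem.Set.mem_add]; exact Or.inl h'))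
      · simp only [hg, if_neg, Bool.false_eq_true, not_false_iff]
        exact ih _ (fun m hm => h m (List.mem_cons_of_mem _ hm))
    · have hadd : PySem.Set.add fr n = fr := PySem.Set.add_of_mem hmem
      simp only [List.foldl_cons]
      have : ∀ g : String → Bool, (if g n then PySem.Set.add fr n else fr) = fr := by
        intro g; by_cases hg : g n <;> simp [hg, hadd]
      rw [this gA, this gB]
      exact ih _ (fun m hm => h m (List.mem_cons_of_mem _ hm))

-- membership after a guarded-add fold: grows, gains a node whose guard holds, never gains one whose guard fails
theorem pv_mem_fold_of_mem (avail : List String) (g : String → Bool) (fr : List String) (x : String)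
    (hx : x ∈ fr) : x ∈ avail.foldl (fun fr node => if g node then PySem.Set.add fr node else fr) fr := by
  induction avail generalizing fr with
  | nil => exact hx
  | cons n ns ih =>
    simp only [List.foldl_cons]
    by_cases hg : g n
    · simp only [hg, if_pos]; exact ih _ (by rw [PySem.Set.mem_add]; exact Or.inl hx)
    · simp only [hg, Bool.false_eq_true, if_neg, not_false_iff]; exact ih _ hx

theorem pv_mem_fold_add (avail : List String) (g : String → Bool) (fr : List String) (x : String)
    (hx : x ∈ avail) (hg : g x = true) :
    x ∈ avail.foldl (fun fr node => if g node then PySem.Set.add fr node else fr) fr := by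
  induction avail generalizing fr with
  | nil => cases hx
  | cons n ns ih =>
    simp only [List.foldl_cons]
    rcases List.mem_cons.mp hx with rfl | hxs
    · rw [hg]
      simp only [if_pos]
      exact pv_mem_fold_of_mem _ _ _ _ (by rw [PySem.Set.mem_add]; exact Or.inr rfl)
    · by_cases hgn : g n
      · simp only [hgn, if_pos]; exact ih _ hxs
      · simp only [hgn, Bool.false_eq_true, if_neg, not_false_iff]; exact ih _ hxs

theorem pv_not_mem_fold (avail : List String) (g : String → Bool) (fr : List String) (x : String)
    (hx : x ∈ fr → False) (hg : g x = false) :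
    x ∈ avail.foldl (fun fr node => if g node then PySem.Set.add fr node else fr) fr → False := by
  induction avail generalizing fr with
  | nil => exact hx
  | cons n ns ih =>
    simp only [List.foldl_cons]
    by_cases hgn : g n
    · simp only [hgn, if_pos]
      refine ih _ ?_
      rw [PySem.Set.mem_add]
      rintro (h | rfl)
      · exact hx h
      · rw [hgn] at hg; cases hg
    · simp only [hgn, Bool.false_eq_true, if_neg, not_false_iff]
      exact ih _ hx

-- if A's guard lets a node through while B's blocks it, the D-configuration holds at that node
theorem pv_guard_diff (frontier traversed : List String) (edges : List (String × String)) (work : String)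
    (hD : ¬ D_work_done frontier traversed edges work)
    (n : String) (hn : n ∈ (edges.filter (fun e => e.1 == work)).map (fun e => e.2)) :
    pvAddA edges work (traversed ++ [work]) n
      = pvAddB ((edges.foldl (fun (p : List String × PySem.Set String) e =>
          if e.1 == work then (p.1 ++ [e.2], p.2)
          else if !(PySem.Set.contains (PySem.Set.ofList (traversed ++ [work])) e.1) then (p.1, PySem.Set.add p.2 e.2)
          else p) ([], PySem.Set.empty)).2) n
      ∨ n ∈ frontier := by
  by_contra hc
  rw [not_or] at hc
  obtain ⟨hne, hnf⟩ := hc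
  -- extract the witnessing edge (work, n)
  simp only [List.mem_map, List.mem_filter] at hn
  obtain ⟨e0, ⟨he0, he0w⟩, rfl⟩ := hn
  rw [beq_iff_eq] at he0w
  -- decide the two guards
  unfold pvAddA pvAddB at hne
  rcases hA : pvBlkA edges work (traversed ++ [work]) e0.2 with _ | _
  · -- A not blocked; B must be blocked (otherwise guards equal)
    rcases hB : PySem.Set.contains ((edges.foldl (fun (p : List String × PySem.Set String) e =>
        if e.1 == work then (p.1 ++ [e.2], p.2)
        else if !(PySem.Set.contains (PySem.Set.ofList (traversed ++ [work])) e.1) then (p.1, PySem.Set.add p.2 e.2)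
        else p) ([], PySem.Set.empty)).2) e0.2 with _ | _
    · rw [hA, hB] at hne; exact hne rfl
    · -- B blocked, A not: build the D-witness
      obtain ⟨e', he', hw', ht', hn'⟩ := (pv_blkB_iff edges work (traversed ++ [work]) e0.2).mp hB
      have hnotA : ∀ e'' ∈ edges, ¬(e''.2 = e0.2 ∧ e''.1 ≠ work ∧ e''.1 ∉ traversed ++ [work] ∧ e''.1 ≠ "") := by
        intro e'' he'' hcon
        exact absurd ((pv_blkA_iff _ _ _ _).mpr ⟨e'', he'', hcon⟩) (by simp [hA])
      have he1 : e'.1 = "" := by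
        by_contra hne''
        exact hnotA e' he' ⟨hn', hw', ht', hne''⟩
      apply hD
      refine ⟨e0, he0, he0w, hnf, ?_, ?_, ?_, ?_⟩
      · -- ("", e0.2) ∈ edges : the B-witness e' has e'.1 = ""
        have hpe : ("", e0.2) = (e'.1, e'.2) := by rw [he1, hn']
        rw [hpe]; simpa using he'
      · -- work ≠ ""
        intro hw0; apply hw'; rw [he1, hw0]
      · -- "" ∉ traversed
        intro hmem; apply ht'; rw [he1]; exact List.mem_append_left _ hmem
      · -- every nonempty non-work prerequisite of e0.2 is traversed
        intro e'' he'' h2 h1 hne''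
        by_contra hnt
        have hnt' : e''.1 ∉ traversed ++ [work] := by
          intro hm; rcases List.mem_append.mp hm with h | h
          · exact hnt h
          · exact h1 (List.mem_singleton.mp h)
        exact hnotA e'' he'' ⟨h2, h1, hnt', hne''⟩
  · -- A blocked → B blocked, guards equal, contradiction
    obtain ⟨e', he', hn', hw', ht', _⟩ := (pv_blkA_iff edges work (traversed ++ [work]) e0.2).mp hA
    have hB : PySem.Set.contains ((edges.foldl (fun (p : List String × PySem.Set String) e =>
        if e.1 == work then (p.1 ++ [e.2], p.2)
        else if !(PySem.Set.contains (PySem.Set.ofList (traversed ++ [work])) e.1) then (p.1, PySem.Set.add p.2 e.2)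
        else p) ([], PySem.Set.empty)).2) e0.2 = true :=
      (pv_blkB_iff edges work (traversed ++ [work]) e0.2).mpr ⟨e', he', hw', ht', hn'⟩
    rw [hA, hB] at hne; exact hne rfl

-- ===== VERDICT (by name: the statement is the Claim_ definition above) =====
theorem work_done_spec : Claim_unchanged_work_done := by
  intro frontier traversed edges work _ hD
  unfold work_done work_done_alt
  simp only
  rw [pv_fold_fst]
  simp only [List.nil_append]
  congr 1
  have := pv_fold_congr ((edges.filter (fun e => e.1 == work)).map (fun e => e.2))
    (pvAddA edges work (traversed ++ [work]))
    (pvAddB ((edges.foldl (fun (p : List String × PySem.Set String) e =>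
      if e.1 == work then (p.1 ++ [e.2], p.2)
      else if !(PySem.Set.contains (PySem.Set.ofList (traversed ++ [work])) e.1) then (p.1, PySem.Set.add p.2 e.2)
      else p) ([], PySem.Set.empty)).2))
    frontier
    (fun n hn => pv_guard_diff frontier traversed edges work hD n hn)
  simpa [pvAddA, pvAddB, pvBlkA] using this

theorem work_done_changed : Claim_changed_work_done := by
  unfold Claim_changed_work_done; decide

theorem work_done_tight : Claim_exact_work_done := by
  intro frontier traversed edges work _ hD
  obtain ⟨e0, he0, hw0, hnf, hemp, hwne, hntr, hall⟩ := hD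
  intro heq
  -- e0.2 is in A's returned frontier but not in B's
  have hAmem : e0.2 ∈ (work_done frontier traversed edges work).1 := by
    unfold work_done
    simp only
    apply pv_mem_fold_add
    · simp only [List.mem_map, List.mem_filter]
      exact ⟨e0, ⟨he0, by simp [hw0]⟩, rfl⟩
    · -- A's guard holds: no truthy untraversed non-work prerequisite
      show (!(pvBlkA edges work (traversed ++ [work]) e0.2)) = true
      have hfa : pvBlkA edges work (traversed ++ [work]) e0.2 = false := by
        refine Bool.eq_false_iff.mpr ?_
        intro htrue
        obtain ⟨e', he', h2, h1, ht, hne⟩ := (pv_blkA_iff _ _ _ _).mp htrue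
        exact ht (List.mem_append_left _ (hall e' he' h2 h1 hne))
      rw [hfa]; rfl
  have hBmem : e0.2 ∉ (work_done_alt frontier traversed edges work).1 := by
    unfold work_done_alt
    simp only
    rw [pv_fold_fst]
    intro hmem
    apply pv_not_mem_fold _ _ frontier e0.2 hnf ?_ hmem
    simp only [Bool.not_eq_false']
    apply (pv_blkB_iff edges work (traversed ++ [work]) e0.2).mpr
    refine ⟨("", e0.2), hemp, fun h => hwne h.symm, ?_, rfl⟩
    intro hm
    rcases List.mem_append.mp hm with h | h
    · exact hntr h
    · exact hwne (List.mem_singleton.mp h).symm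
  rw [heq] at hAmem
  exact hBmem hAmem
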